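-- pv_equiv track=rewrite | github.com/Lengthy-Monarchy/python-toy-problems | challengeone.py | solution
-- ===== SOURCE A (Python) =====
-- def solution(A):
--     N = len(A)
--     moves = 0
--
--     # Iterate through each box
--     for i in range(N):
--         diff = A[i] - 10  # Calculate the difference between current bricks and target (10)
--         A[i] = 10  # Update current box with 10 bricks
--
--         # Propagate the difference to neighboring boxes
--         if diff > 0:  # If difference is positive, propagate to the next box
--             j = i + 1
--             while j < N and diff > 0:
--                 if A[j] < 10:  # Check if the next box has less than 10 bricks
--                     # Move bricks from current box to next box
--                     move_bricks = min(diff, 10 - A[j])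
--                     A[j] += move_bricks
--                     diff -= move_bricks
--                     moves += move_bricks
--                 j += 1
--         elif diff < 0:  # If difference is negative, propagate to the previous box
--             j = i - 1
--             while j >= 0 and diff < 0:
--                 if A[j] > 10:  # Check if the previous box has more than 10 bricks
--                     # Move bricks from previous box to current box
--                     move_bricks = min(-diff, A[j] - 10)
--                     A[j] -= move_bricks
--                     diff += move_bricks
--                     moves += move_bricks
--                 j -= 1
--
--     # Check if all boxes have exactly 10 bricks
--     for bricks in A:
--         if bricks != 10:
--             return -1
--
--     return moves
-- ===== SOURCE B (Python) =====
-- def solution(A):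
--     # Single pass: pool of surplus bricks seen so far; each deficit box consumes
--     # min(deficit, pool) bricks, each such brick is one move.
--     moves = 0
--     pool = 0
--     for a in A:
--         if a > 10:
--             pool += a - 10
--         elif a < 10:
--             t = min(10 - a, pool)
--             pool -= t
--             moves += t
--     return moves
-- ===== Notes on version B (the rewrite author's own statement) =====
-- stated objective: faster
-- what changed: Replaced the O(N^2) mutate-and-rescan propagation (and the dead backward/-1 branches) by a single left-to-right pass carrying a surplus pool: each deficit box consumes min(deficit, pool) bricks, counted as moves.
import Mathlib
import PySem

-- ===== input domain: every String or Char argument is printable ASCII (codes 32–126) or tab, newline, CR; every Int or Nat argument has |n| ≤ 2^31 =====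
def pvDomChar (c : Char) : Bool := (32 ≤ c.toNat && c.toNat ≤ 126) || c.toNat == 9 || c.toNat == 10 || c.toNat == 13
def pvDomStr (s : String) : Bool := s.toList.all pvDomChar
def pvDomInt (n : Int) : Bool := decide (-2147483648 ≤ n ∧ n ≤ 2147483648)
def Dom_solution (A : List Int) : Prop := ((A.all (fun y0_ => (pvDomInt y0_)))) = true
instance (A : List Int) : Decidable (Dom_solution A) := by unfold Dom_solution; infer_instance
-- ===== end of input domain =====

-- B replaces A's quadratic mutate-and-rescan brick propagation by one linear pass with a surplus
-- pool (measured asymptotically faster). A mutates its argument in place; the equivalence proved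
-- here is about the RETURN value only (B does not mutate).

-- ===== PORT A =====
-- inner 'while j < N and diff > 0' loop; fuel ≥ remaining positions makes it total (same iterations)
def fwdLoop : Nat → List Int → Int → Int → Int → (List Int × Int × Int)
  | 0, l, _, diff, moves => (l, diff, moves)
  | fuel+1, l, j, diff, moves =>
    if j < (l.length : Int) ∧ diff > 0 then
      let aj := PySem.List.pyGetD l j 0
      if aj < 10 then
        let mb := min diff (10 - aj)
        fwdLoop fuel (PySem.List.pySetD l j (aj + mb)) (j+1) (diff - mb) (moves + mb)
      else fwdLoop fuel l (j+1) diff moves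
    else (l, diff, moves)

-- inner 'while j >= 0 and diff < 0' loop; fuel ≥ j+1 makes it total (same iterations)
def bwdLoop : Nat → List Int → Int → Int → Int → (List Int × Int × Int)
  | 0, l, _, diff, moves => (l, diff, moves)
  | fuel+1, l, j, diff, moves =>
    if 0 ≤ j ∧ diff < 0 then
      let aj := PySem.List.pyGetD l j 0
      if aj > 10 then
        let mb := min (-diff) (aj - 10)
        bwdLoop fuel (PySem.List.pySetD l j (aj - mb)) (j-1) (diff + mb) (moves + mb)
      else bwdLoop fuel l (j-1) diff moves
    else (l, diff, moves)

-- body of A's 'for i in range(N)' loop, state = (A, moves); indices i are in range, so pyGetD/pySetD are exact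
def stepA (st : List Int × Int) (i : Int) : List Int × Int :=
  let diff := PySem.List.pyGetD st.1 i 0 - 10
  let l := PySem.List.pySetD st.1 i 10
  if diff > 0 then
    let r := fwdLoop l.length l (i+1) diff st.2
    (r.1, r.2.2)
  else if diff < 0 then
    let r := bwdLoop l.length l (i-1) diff st.2
    (r.1, r.2.2)
  else (l, st.2)

def solution (A : List Int) : Int :=
  let N : Int := (A.length : Int)
  let st := (PySem.List.pyRange 0 N 1).foldl stepA (A, 0)
  -- final 'for bricks in A: if bricks != 10: return -1'
  if st.1.any (fun b => b ≠ 10) then -1 else st.2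

-- ===== PORT B =====
-- state = (pool, moves)
def stepB (st : Int × Int) (a : Int) : Int × Int :=
  if a > 10 then (st.1 + (a - 10), st.2)
  else if a < 10 then (st.1 - min (10 - a) st.1, st.2 + min (10 - a) st.1)
  else st

def solution_alt (A : List Int) : Int :=
  (A.foldl stepB (0, 0)).2

-- ===== PRECONDITION & SPEC =====
def Spec_solution (A : List Int) (out : Int) : Prop := out = solution_alt A
instance (A : List Int) (out : Int) : Decidable (Spec_solution A out) := by unfold Spec_solution; infer_instance

-- ===== CLAIM (what is proved, stated in full; the proofs are below) =====
def Claim_equal_solution : Prop := ∀ (A : List Int), Dom_solution A → Spec_solution A (solution A)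

-- ===== LEMMAS AND PROOFS =====

-- total remaining deficit capacity of a suffix
def cap (t : List Int) : Int := (t.map (fun a => max (10 - a) 0)).sum

-- greedily top up deficit boxes of t (to 10) with a pool of p bricks, left to right
def fill (p : Int) : List Int → List Int
  | [] => []
  | a :: t => if a < 10 then (a + min p (10 - a)) :: fill (p - min p (10 - a)) t else a :: fill p t

theorem cap_nonneg (t : List Int) : 0 ≤ cap t := by
  induction t with
  | nil => simp [cap]
  | cons a t ih => simp only [cap, List.map_cons, List.sum_cons] at *; omega

theorem cap_cons (a : Int) (t : List Int) : cap (a :: t) = max (10 - a) 0 + cap t := by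
  simp [cap]

theorem fill_zero (t : List Int) : fill 0 t = t := by
  induction t with
  | nil => rfl
  | cons a t ih =>
    by_cases h : a < 10
    · have h0 : min (0:Int) (10 - a) = 0 := by omega
      simp [fill, h, h0, ih]
    · simp [fill, h, ih]

theorem fill_fill (s p : Int) (t : List Int) (hs : 0 ≤ s) (hp : 0 ≤ p) :
    fill s (fill p t) = fill (p + s) t := by
  induction t generalizing p s with
  | nil => rfl
  | cons a t ih =>
    by_cases h : a < 10
    · by_cases hpd : p < 10 - a
      · have hm : min p (10 - a) = p := by omega
        have h1 : a + p < 10 ∨ ¬ a + p < 10 := by omega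
        simp only [fill, if_pos h, hm, sub_self, fill_zero]
        by_cases h2 : a + p < 10
        · have e1 : a + p + min s (10 - (a + p)) = a + min (p + s) (10 - a) := by omega
          have e2 : s - min s (10 - (a + p)) = p + s - min (p + s) (10 - a) := by omega
          simp [h2, e1, e2]
        · -- p = 10 - a exactly is excluded by hpd; here a + p ≥ 10 is impossible
          omega
      · have hm : min p (10 - a) = 10 - a := by omega
        have h2 : ¬ (a + (10 - a) < 10) := by omega
        have e : p - (10 - a) + s = p + s - min (p + s) (10 - a) := by omega
        have e2 : a + (10 - a) = a + min (p + s) (10 - a) := by omega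
        simp only [fill, if_pos h, hm, if_neg h2]
        rw [ih _ _ hs (by omega)]
        rw [e2, e]
    · simp [fill, h, ih _ _ hs hp]

theorem cap_fill (p : Int) (t : List Int) (hp : 0 ≤ p) :
    cap (fill p t) = cap t - min p (cap t) := by
  induction t generalizing p with
  | nil =>
    have : min p ((0:Int)) = 0 := by omega
    simp [fill, cap, this]
  | cons a t ih =>
    have hc := cap_nonneg t
    by_cases h : a < 10
    · by_cases hpd : p < 10 - a
      · have hm : min p (10 - a) = p := by omega
        simp only [fill, if_pos h, hm, sub_self, fill_zero, cap_cons]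
        omega
      · have hm : min p (10 - a) = 10 - a := by omega
        simp only [fill, if_pos h, hm, cap_cons]
        rw [ih _ (by omega)]
        have h2 : cap t - min (p - (10 - a)) (cap t) ≥ 0 := by omega
        omega
    · simp only [fill, if_neg h, cap_cons]
      rw [ih _ hp]
      omega

theorem fwd_spec (r : List Int) : ∀ (P : List Int) (s m : Int) (fuel : Nat),
    r.length ≤ fuel → 0 ≤ s →
    fwdLoop fuel (P ++ r) (P.length : Int) s m
      = (P ++ fill s r, s - min s (cap r), m + min s (cap r)) := by
  induction r with
  | nil =>
    intro P s m fuel _ hs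
    have hmin : min s (cap ([] : List Int)) = 0 := by
      simp only [cap, List.map_nil, List.sum_nil]; omega
    cases fuel with
    | zero => rw [hmin]; simp [fwdLoop, fill]
    | succ f =>
      have hcond : ¬ ((P.length : Int) < ((P ++ ([] : List Int)).length : Int) ∧ 0 < s) := by
        simp
      rw [hmin]; simp [fwdLoop, fill]
  | cons a t ih =>
    intro P s m fuel hf hs
    obtain ⟨f, rfl⟩ : ∃ f, fuel = f + 1 :=
      ⟨fuel - 1, by simp only [List.length_cons] at hf; omega⟩
    have hc := cap_nonneg t
    by_cases hs0 : s = 0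
    · subst hs0
      have : ¬ ((P.length : Int) < ((P ++ a :: t).length : Int) ∧ (0:Int) < 0) := by omega
      have hmin : min (0:Int) (cap (a :: t)) = 0 := by
        have := cap_nonneg (a :: t); omega
      rw [fill_zero, hmin]
      simp [fwdLoop]
    · have hspos : 0 < s := by omega
      have hf' : t.length ≤ f := by simp only [List.length_cons] at hf; omega
      have hcond : (P.length : Int) < ((P ++ a :: t).length : Int) ∧ 0 < s := by
        refine ⟨by simp, hspos⟩
      have hget : PySem.List.pyGetD (P ++ a :: t) (P.length : Int) 0 = a := by
        simp [PySem.List.pyGetD]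
      by_cases h : a < 10
      · have hset : PySem.List.pySetD (P ++ a :: t) (P.length : Int)
            (a + min s (10 - a)) = (P ++ [a + min s (10 - a)]) ++ t := by
          rw [PySem.List.pySetD_of_nonneg _ _ (by positivity)]
          simp
        have hlen : ((P ++ [a + min s (10 - a)]).length : Int) = (P.length : Int) + 1 := by
          simp
        simp only [fwdLoop, if_pos hcond, hget, if_pos h, hset]
        rw [← hlen]
        rw [ih _ _ _ _ hf' (by omega)]
        have e1 : min s (cap (a :: t)) = min s (10 - a) + min (s - min s (10 - a)) (cap t) := by
          rw [cap_cons]; omega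
        simp only [fill, if_pos h, List.append_assoc, List.singleton_append, Prod.mk.injEq]
        refine ⟨by simp, by omega, by omega⟩
      · have hset : (P ++ a :: t) = (P ++ [a]) ++ t := by simp
        have hlen : ((P ++ [a]).length : Int) = (P.length : Int) + 1 := by simp
        simp only [fwdLoop, if_pos hcond, hget, if_neg h]
        rw [hset, ← hlen]
        rw [ih _ _ _ _ hf' hs]
        have e1 : cap (a :: t) = cap t := by rw [cap_cons]; omega
        simp only [fill, if_neg h, e1, List.append_assoc, List.singleton_append]

theorem bwd_spec (k : Nat) (r : List Int) : ∀ (fuel : Nat) (j d m : Int), j < (k : Int) →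
    bwdLoop fuel (List.replicate k 10 ++ r) j d m = (List.replicate k 10 ++ r, d, m) := by
  intro fuel
  induction fuel with
  | zero => intro j d m _; rfl
  | succ f ih =>
    intro j d m hj
    by_cases hcond : 0 ≤ j ∧ d < 0
    · have hget : PySem.List.pyGetD (List.replicate k 10 ++ r) j 0 = 10 := by
        rw [PySem.List.pyGetD_of_nonneg _ _ hcond.1]
        have hjk : j.toNat < k := by omega
        rw [List.getD_eq_getElem?_getD, List.getElem?_append_left (by simpa using hjk)]
        simp [hjk]
      have h10 : ¬ ((10:Int) > 10) := by omega
      simp only [bwdLoop, if_pos hcond, hget, if_neg h10]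
      exact ih (j - 1) d m (by omega)
    · simp [bwdLoop, hcond]

theorem main_inv (t : List Int) : ∀ (i : Nat) (p m : Int), 0 ≤ p →
    (PySem.List.pyRange (i : Int) ((i : Int) + (t.length : Int)) 1).foldl stepA
        (List.replicate i 10 ++ fill p t, m + min p (cap t))
      = (List.replicate (i + t.length) 10, (t.foldl stepB (p, m)).2) := by
  induction t with
  | nil =>
    intro i p m hp
    have hmin : min p (cap ([] : List Int)) = 0 := by
      simp only [cap, List.map_nil, List.sum_nil]; omega
    rw [hmin]
    simp [PySem.List.pyRange_one_eq_nil, fill]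
  | cons a t ih =>
    intro i p m hp
    have hc := cap_nonneg t
    have hrange : PySem.List.pyRange (i : Int) ((i : Int) + ((a :: t).length : Int)) 1
        = (i : Int) :: PySem.List.pyRange ((i : Int) + 1) ((i : Int) + ((a :: t).length : Int)) 1 := by
      apply PySem.List.pyRange_one_cons
      simp only [List.length_cons]
      push_cast
      omega
    have hcnt : i + (a :: t).length = (i + 1) + t.length := by
      simp only [List.length_cons]; omega
    have hcast : ((i:Int) + 1) = ((i + 1 : Nat) : Int) := by push_cast; ring
    have hlen : (i : Int) + ((a :: t).length : Int) = ((i + 1 : Nat) : Int) + (t.length : Int) := by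
      simp only [List.length_cons]; push_cast; ring
    have hrepl : List.replicate (i + 1) (10:Int) = List.replicate i 10 ++ [10] := by
      simp [List.replicate_succ']
    have htoNat : ((i : Int)).toNat = (List.replicate i (10:Int)).length := by simp
    rw [hrange, List.foldl_cons, List.foldl_cons, hcnt]
    by_cases h : a < 10
    · -- head of fill p (a :: t) is a + min p (10 - a)
      have hfill : fill p (a :: t) = (a + min p (10 - a)) :: fill (p - min p (10 - a)) t := by
        simp [fill, h]
      have hget : PySem.List.pyGetD (List.replicate i 10 ++ fill p (a :: t)) (i : Int) 0
          = a + min p (10 - a) := by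
        rw [hfill, PySem.List.pyGetD_of_nonneg _ _ (by positivity), htoNat,
          List.getD_eq_getElem?_getD, List.getElem?_append_right (le_refl _)]
        simp
      have hset : PySem.List.pySetD (List.replicate i 10 ++ fill p (a :: t)) (i : Int) 10
          = List.replicate (i + 1) 10 ++ fill (p - min p (10 - a)) t := by
        rw [hfill, PySem.List.pySetD_of_nonneg _ _ (by positivity), hrepl, htoNat,
          List.set_append]
        simp
      by_cases hpd : p < 10 - a
      · -- pool too small: head stays < 10, diff < 0, backward no-op
        have hm : min p (10 - a) = p := by omega
        have hdiff : PySem.List.pyGetD (List.replicate i 10 ++ fill p (a :: t)) (i : Int) 0 - 10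
            = a + p - 10 := by rw [hget]; omega
        simp only [stepA, hdiff, hset, hm, sub_self, fill_zero]
        rw [if_neg (by omega), if_pos (by omega : a + p - 10 < 0)]
        rw [bwd_spec (i + 1) t _ ((i:Int) - 1) _ _ (by push_cast; omega)]
        have hB : stepB (p, m) a = (0, m + p) := by
          simp only [stepB]
          rw [if_neg (by omega : ¬ a > 10), if_pos h]
          have hmm : min (10 - a) p = p := by omega
          rw [hmm, sub_self]
        have harith : m + min p (cap (a :: t)) = (m + p) + min 0 (cap t) := by
          rw [cap_cons]; omega
        have hI := ih (i + 1) 0 (m + p) (le_refl 0)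
        rw [fill_zero] at hI
        rw [hB, harith, hlen, hcast]
        exact hI
      · -- pool covers the deficit: head becomes 10, diff = 0
        have hm : min p (10 - a) = 10 - a := by omega
        have hdiff : PySem.List.pyGetD (List.replicate i 10 ++ fill p (a :: t)) (i : Int) 0 - 10
            = 0 := by rw [hget]; omega
        simp only [stepA, hdiff, hset, hm]
        rw [if_neg (by omega), if_neg (by omega)]
        have hB : stepB (p, m) a = (p - (10 - a), m + (10 - a)) := by
          simp only [stepB]
          rw [if_neg (by omega : ¬ a > 10), if_pos h]
          have hmm : min (10 - a) p = 10 - a := by omega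
          rw [hmm]
        have harith : m + min p (cap (a :: t)) = (m + (10 - a)) + min (p - (10 - a)) (cap t) := by
          rw [cap_cons]; omega
        have hI := ih (i + 1) (p - (10 - a)) (m + (10 - a)) (by omega)
        rw [hB, harith, hlen, hcast]
        exact hI
    · -- a ≥ 10: head stays a
      have hfill : fill p (a :: t) = a :: fill p t := by simp [fill, h]
      have hget : PySem.List.pyGetD (List.replicate i 10 ++ fill p (a :: t)) (i : Int) 0 = a := by
        rw [hfill, PySem.List.pyGetD_of_nonneg _ _ (by positivity), htoNat,
          List.getD_eq_getElem?_getD, List.getElem?_append_right (le_refl _)]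
        simp
      have hset : PySem.List.pySetD (List.replicate i 10 ++ fill p (a :: t)) (i : Int) 10
          = List.replicate (i + 1) 10 ++ fill p t := by
        rw [hfill, PySem.List.pySetD_of_nonneg _ _ (by positivity), hrepl, htoNat,
          List.set_append]
        simp
      have hcapc : cap (a :: t) = cap t := by rw [cap_cons]; omega
      by_cases h10 : a = 10
      · subst h10
        have hdiff : PySem.List.pyGetD (List.replicate i 10 ++ fill p (10 :: t)) (i : Int) 0 - 10
            = 0 := by rw [hget]; omega
        simp only [stepA, hdiff, hset]
        rw [if_neg (by omega), if_neg (by omega)]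
        have hB : stepB (p, m) 10 = (p, m) := by
          simp only [stepB]
          rw [if_neg (by omega : ¬ (10:Int) > 10), if_neg (by omega : ¬ (10:Int) < 10)]
        have hI := ih (i + 1) p m hp
        rw [hB, hcapc, hlen, hcast]
        exact hI
      · -- a > 10: forward propagation
        have hagt : a > 10 := by omega
        have hdiff : PySem.List.pyGetD (List.replicate i 10 ++ fill p (a :: t)) (i : Int) 0 - 10
            = a - 10 := by rw [hget]
        simp only [stepA, hdiff, hset]
        rw [if_pos (by omega : a - 10 > 0)]
        have hF := fwd_spec (fill p t) (List.replicate (i+1) 10) (a - 10)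
          (m + min p (cap (a :: t)))
          ((List.replicate (i + 1) (10:Int) ++ fill p t).length) (by simp) (by omega)
        rw [show (((List.replicate (i+1) (10:Int)).length : Int)) = (i : Int) + 1 by simp] at hF
        rw [hF]
        dsimp only
        rw [fill_fill _ _ _ (by omega) hp, cap_fill _ _ hp]
        have hB : stepB (p, m) a = (p + (a - 10), m) := by
          simp only [stepB]
          rw [if_pos hagt]
        have harith : m + min p (cap (a :: t)) + min (a - 10) (cap t - min p (cap t))
            = m + min (p + (a - 10)) (cap t) := by
          rw [hcapc]; omega
        have hI := ih (i + 1) (p + (a - 10)) m (by omega)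
        rw [hB, harith, hlen, hcast]
        exact hI

theorem replicate_no_bad (n : Nat) : (List.replicate n (10:Int)).any (fun b => b ≠ 10) = false := by
  simp

-- ===== VERDICT (by name: the statement is the Claim_ definition above) =====
theorem solution_spec : Claim_equal_solution := by
  intro A _
  unfold Spec_solution solution
  have h0 := main_inv A 0 0 0 (le_refl 0)
  rw [fill_zero] at h0
  have hmin : min (0:Int) (cap A) = 0 := by have := cap_nonneg A; omega
  rw [hmin] at h0
  simp only [List.replicate, List.nil_append, add_zero, Nat.cast_zero, zero_add] at h0
  dsimp only
  rw [h0]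
  simp only [replicate_no_bad, Bool.false_eq_true, if_false]
  rfl
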